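-- pv_equiv track=rewrite | github.com/ltphongssvn/cs1090b_HallucinationLegalRAGChatbots | scripts/eda_ms3_corpus.py | _canonical_circuit_sort
-- ===== SOURCE A (Python) =====
-- CANONICAL_CIRCUITS = [f"ca{i}" for i in range(1, 12)] + ["cadc", "cafc"]
--
-- def _canonical_circuit_sort(courts: list[str], counts: list[int]) -> tuple[list[str], list[int]]:
--     pairs = dict(zip(courts, counts))
--     ordered: list[tuple[str, int]] = []
--     for c in CANONICAL_CIRCUITS:
--         if c in pairs:
--             ordered.append((c, pairs.pop(c)))
--     for c in sorted(pairs):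
--         ordered.append((c, pairs[c]))
--     return [c for c, _ in ordered], [n for _, n in ordered]
-- ===== SOURCE B (Python) =====
-- CANONICAL_CIRCUITS = [f"ca{i}" for i in range(1, 12)] + ["cadc", "cafc"]
--
-- def _canonical_circuit_sort(courts: list[str], counts: list[int]) -> tuple[list[str], list[int]]:
--     pairs = dict(zip(courts, counts))
--     rank = {c: i for i, c in enumerate(CANONICAL_CIRCUITS)}
--     items = sorted(pairs.items(),
--                    key=lambda kv: (rank.get(kv[0], len(CANONICAL_CIRCUITS)), kv[0]))
--     return [c for c, _ in items], [n for _, n in items]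
-- ===== Notes on version B (the rewrite author's own statement) =====
-- stated objective: simpler
-- what changed: Replaces A's two-phase construction (explicit canonical-list scan with dict pops, then a separate sort of the leftovers) by a single sort of the dict items under a precomputed rank table, with rank default len(CANONICAL_CIRCUITS) and the name as tie-break.
import Mathlib
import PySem

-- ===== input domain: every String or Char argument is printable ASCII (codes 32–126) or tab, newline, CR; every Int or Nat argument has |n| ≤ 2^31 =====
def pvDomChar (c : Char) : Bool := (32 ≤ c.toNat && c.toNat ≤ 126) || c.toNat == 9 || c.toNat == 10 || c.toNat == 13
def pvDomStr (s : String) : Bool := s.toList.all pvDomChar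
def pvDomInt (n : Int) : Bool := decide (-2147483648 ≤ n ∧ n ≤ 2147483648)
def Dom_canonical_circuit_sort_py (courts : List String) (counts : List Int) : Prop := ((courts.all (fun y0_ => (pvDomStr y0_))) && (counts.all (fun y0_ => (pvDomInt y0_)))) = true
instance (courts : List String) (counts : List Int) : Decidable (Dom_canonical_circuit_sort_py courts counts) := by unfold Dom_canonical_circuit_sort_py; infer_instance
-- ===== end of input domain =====

-- B replaces A's two-phase construction (canonical-list scan with dict pops, then a separate
-- sort of the leftover courts) by one sort of the dict items keyed by (precomputed rank, name).


-- ===== PORT A =====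
-- module constant: CANONICAL_CIRCUITS = [f"ca{i}" for i in range(1, 12)] + ["cadc", "cafc"]
def pvCanon : List String :=
  (PySem.List.pyRange 1 12 1).map (fun i => "ca" ++ PySem.Int.toStr i) ++ ["cadc", "cafc"]

-- loop body of A's first for-loop: 'if c in pairs: ordered.append((c, pairs.pop(c)))'
def pvStepA (st : PySem.Dict String Int × List (String × Int)) (c : String) :
    PySem.Dict String Int × List (String × Int) :=
  match st.1.pop? c with
  | some (v, d') => (d', st.2 ++ [(c, v)])
  | none => st

def canonical_circuit_sort_py (courts : List String) (counts : List Int) : List String × List Int :=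
  let pairs := (courts.zip counts).foldl (fun d p => d.insert p.1 p.2) PySem.Dict.empty
  let st := pvCanon.foldl pvStepA (pairs, [])
  -- 'for c in sorted(pairs): ordered.append((c, pairs[c]))'; c ranges over the dict's own
  -- keys so pairs[c] cannot raise and the .getD 0 default is never taken
  let ordered := (PySem.List.sorted st.1.keys (fun c => c)).foldl
      (fun acc c => acc ++ [(c, (st.1.get? c).getD 0)]) st.2
  (ordered.map (fun p => p.1), ordered.map (fun p => p.2))

-- ===== PORT B =====
-- rank = {c: i for i, c in enumerate(CANONICAL_CIRCUITS)}  (input-independent table)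
def pvRankTable : PySem.Dict String Int :=
  (PySem.List.enumerate pvCanon).foldl (fun d p => d.insert p.2 p.1) PySem.Dict.empty

def canonical_circuit_sort_py_alt (courts : List String) (counts : List Int) : List String × List Int :=
  let pairs := (courts.zip counts).foldl (fun d p => d.insert p.1 p.2) PySem.Dict.empty
  let items := PySem.List.sorted2 pairs.items
      (fun kv => pvRankTable.getD kv.1 (pvCanon.length : Int)) (fun kv => kv.1)
  (items.map (fun p => p.1), items.map (fun p => p.2))

-- ===== PRECONDITION & SPEC =====
def Spec_canonical_circuit_sort_py (courts : List String) (counts : List Int) (out : List String × List Int) : Prop := out = canonical_circuit_sort_py_alt courts counts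
instance (courts : List String) (counts : List Int) (out : List String × List Int) : Decidable (Spec_canonical_circuit_sort_py courts counts out) := by unfold Spec_canonical_circuit_sort_py; infer_instance

-- ===== CLAIM (what is proved, stated in full; the proofs are below) =====
def Claim_equal_canonical_circuit_sort_py : Prop := ∀ (courts : List String) (counts : List Int), Dom_canonical_circuit_sort_py courts counts → Spec_canonical_circuit_sort_py courts counts (canonical_circuit_sort_py courts counts)

-- ===== LEMMAS AND PROOFS =====

-- the canonical list as a literal
def pvCC : List String :=
  ["ca1","ca2","ca3","ca4","ca5","ca6","ca7","ca8","ca9","ca10","ca11","cadc","cafc"]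

theorem pvCanon_eq : pvCanon = pvCC := by decide

theorem pvCC_nodup : pvCC.Nodup := by decide

-- the rank B's table assigns to a court name
def pvRk (c : String) : Int := pvRankTable.getD c (pvCanon.length : Int)

theorem pvRankTable_eq : pvRankTable = PySem.Dict.mk
    [("ca1",0),("ca2",1),("ca3",2),("ca4",3),("ca5",4),("ca6",5),("ca7",6),("ca8",7),
     ("ca9",8),("ca10",9),("ca11",10),("cadc",11),("cafc",12)] := by decide

theorem pvRk_lt_of_mem {c : String} (h : c ∈ pvCC) : pvRk c < 13 := by
  fin_cases h <;> decide

theorem pvRk_of_not_mem {c : String} (h : c ∉ pvCC) : pvRk c = 13 := by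
  simp [pvCC] at h
  obtain ⟨h1, h2, h3, h4, h5, h6, h7, h8, h9, h10, h11, h12, h13⟩ := h
  have hlen : (pvCanon.length : Int) = 13 := by decide
  rw [pvRk, pvRankTable_eq, hlen]
  have e1 : ("ca1" == c) = false := by simp only [beq_eq_false_iff_ne]; exact fun e => h1 e.symm
  have e2 : ("ca2" == c) = false := by simp only [beq_eq_false_iff_ne]; exact fun e => h2 e.symm
  have e3 : ("ca3" == c) = false := by simp only [beq_eq_false_iff_ne]; exact fun e => h3 e.symm
  have e4 : ("ca4" == c) = false := by simp only [beq_eq_false_iff_ne]; exact fun e => h4 e.symm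
  have e5 : ("ca5" == c) = false := by simp only [beq_eq_false_iff_ne]; exact fun e => h5 e.symm
  have e6 : ("ca6" == c) = false := by simp only [beq_eq_false_iff_ne]; exact fun e => h6 e.symm
  have e7 : ("ca7" == c) = false := by simp only [beq_eq_false_iff_ne]; exact fun e => h7 e.symm
  have e8 : ("ca8" == c) = false := by simp only [beq_eq_false_iff_ne]; exact fun e => h8 e.symm
  have e9 : ("ca9" == c) = false := by simp only [beq_eq_false_iff_ne]; exact fun e => h9 e.symm
  have e10 : ("ca10" == c) = false := by simp only [beq_eq_false_iff_ne]; exact fun e => h10 e.symm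
  have e11 : ("ca11" == c) = false := by simp only [beq_eq_false_iff_ne]; exact fun e => h11 e.symm
  have e12 : ("cadc" == c) = false := by simp only [beq_eq_false_iff_ne]; exact fun e => h12 e.symm
  have e13 : ("cafc" == c) = false := by simp only [beq_eq_false_iff_ne]; exact fun e => h13 e.symm
  simp [PySem.Dict.getD, PySem.Dict.get?, List.find?, e1, e2, e3, e4, e5, e6, e7, e8, e9,
    e10, e11, e12, e13]

theorem pvCC_rank_pairwise : pvCC.Pairwise (fun a b => pvRk a < pvRk b) := by decide

-- lookups through 'erase' at a different key
theorem pv_get?_erase_of_ne (d : PySem.Dict String Int) {c x : String} (h : x ≠ c) :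
    (d.erase c).get? x = d.get? x := by
  simp only [PySem.Dict.erase, PySem.Dict.get?]
  congr 1
  induction d.items with
  | nil => rfl
  | cons p t ih =>
    by_cases hc : p.1 = c
    · have hcx : (c == x) = false := by
        simp only [beq_eq_false_iff_ne]; exact fun e => h e.symm
      simp [hc, List.find?, hcx, ih]
    · by_cases hx : p.1 = x
      · have hxc : ¬ x = c := h
        simp [List.find?, hx, hxc]
      · have hpx : (p.1 == x) = false := beq_eq_false_iff_ne.mpr hx
        simp [hc, List.find?, hpx, ih]

theorem pv_contains_erase_of_ne (d : PySem.Dict String Int) {c x : String} (h : x ≠ c) :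
    (d.erase c).contains x = d.contains x := by
  rw [PySem.Dict.contains_eq_isSome_get?, PySem.Dict.contains_eq_isSome_get?,
    pv_get?_erase_of_ne d h]

theorem pv_getD_erase_of_ne (d : PySem.Dict String Int) {c x : String} (h : x ≠ c) :
    (d.erase c).getD x 0 = d.getD x 0 := by
  rw [PySem.Dict.getD_eq_get?_getD, PySem.Dict.getD_eq_get?_getD, pv_get?_erase_of_ne d h]

theorem pv_keys_erase_nodup (d : PySem.Dict String Int) (c : String) (h : d.keys.Nodup) :
    (d.erase c).keys.Nodup := by
  simp only [PySem.Dict.keys, PySem.Dict.erase]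
  exact List.Nodup.sublist (List.Sublist.map _ List.filter_sublist) h

-- what A's first loop computes: the canonical entries in canonical order, and the
-- dict shrunk to the non-canonical entries
theorem pv_phase1 (cs : List String) (d : PySem.Dict String Int) (acc : List (String × Int))
    (hnd : d.keys.Nodup) (hcs : cs.Nodup) :
    cs.foldl pvStepA (d, acc) =
      (PySem.Dict.mk (d.items.filter (fun p => !cs.contains p.1)),
       acc ++ (cs.filter (fun c => d.contains c)).map (fun c => (c, d.getD c 0))) := by
  induction cs generalizing d acc with
  | nil => simp
  | cons c cs ih =>
    rw [List.nodup_cons] at hcs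
    have hcmem := hcs.1
    simp only [List.foldl_cons]
    by_cases hc : (d.get? c).isSome
    · obtain ⟨v, hv⟩ := Option.isSome_iff_exists.mp hc
      have hstep : pvStepA (d, acc) c = (d.erase c, acc ++ [(c, v)]) := by
        simp [pvStepA, PySem.Dict.pop?, hv]
      rw [hstep, ih (d.erase c) _ (pv_keys_erase_nodup d c hnd) hcs.2]
      simp only [Prod.mk.injEq]
      refine ⟨?_, ?_⟩
      · congr 1
        simp only [PySem.Dict.erase, List.filter_filter]
        apply List.filter_congr
        intro p _
        by_cases hpc : p.1 = c
        · simp [hpc]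
        · simp [hpc]
      · have hfil : cs.filter (fun x => (d.erase c).contains x)
            = cs.filter (fun x => d.contains x) := by
          apply List.filter_congr
          intro x hx
          exact pv_contains_erase_of_ne d (fun e => hcmem (e ▸ hx))
        have hmap : (cs.filter (fun x => d.contains x)).map
              (fun x => (x, (d.erase c).getD x 0))
            = (cs.filter (fun x => d.contains x)).map (fun x => (x, d.getD x 0)) := by
          apply List.map_congr_left
          intro x hx
          have hxc : x ≠ c := fun e => hcmem (e ▸ (List.mem_of_mem_filter hx))
          rw [pv_getD_erase_of_ne d hxc]
        have hcont : d.contains c = true := by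
          rw [PySem.Dict.contains_eq_isSome_get?, hc]
        have hgd : d.getD c 0 = v := by rw [PySem.Dict.getD_eq_get?_getD, hv]; rfl
        rw [hfil, hmap, List.filter_cons]
        rw [if_pos hcont]
        simp only [List.map_cons, hgd, List.append_assoc, List.singleton_append]
    · have hnone : d.get? c = none := Option.not_isSome_iff_eq_none.mp (by simp_all)
      have hstep : pvStepA (d, acc) c = (d, acc) := by
        simp [pvStepA, PySem.Dict.pop?, hnone]
      rw [hstep, ih d acc hnd hcs.2]
      have hcont : d.contains c = false := by
        rw [PySem.Dict.contains_eq_isSome_get?, hnone]; rfl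
      simp only [Prod.mk.injEq]
      refine ⟨?_, ?_⟩
      · congr 1
        apply List.filter_congr
        intro p hp
        have hpc : p.1 ≠ c := by
          intro e
          have : d.get? p.1 = some p.2 := PySem.Dict.get?_of_mem_items d hp hnd
          rw [e, hnone] at this
          simp at this
        have hb1 : (c == p.1) = false := beq_eq_false_iff_ne.mpr (fun e => hpc e.symm)
        have hb2 : (p.1 == c) = false := beq_eq_false_iff_ne.mpr hpc
        simp
        exact fun _ => hpc
      · rw [List.filter_cons]
        simp [hcont]

-- Python's tuple key (int, str) is the lexicographic product order
theorem pv_sorted2_eq_sorted_lex {α : Type} (xs : List α) (k1 : α → Int) (k2 : α → String) :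
    PySem.List.sorted2 xs k1 k2 = PySem.List.sorted xs (fun x => toLex (k1 x, k2 x)) := by
  have hfe : (fun a b : α => decide (k1 a < k1 b) || !decide (k1 b < k1 a) && decide (k2 a < k2 b))
      = (fun a b : α => decide ((fun x => toLex (k1 x, k2 x)) a < (fun x => toLex (k1 x, k2 x)) b)) := by
    funext a b
    simp only [Prod.Lex.toLex_lt_toLex]
    rcases lt_trichotomy (k1 a) (k1 b) with h | h | h
    · simp [h]
    · simp [h]
    · simp [not_lt_of_gt h, ne_of_gt h]
      exact fun hle => absurd (lt_of_lt_of_le h hle) (lt_irrefl _)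
  have h1 : PySem.List.sorted2 xs k1 k2 = List.foldl (fun acc x =>
      PySem.List.insertBy (fun a b : α =>
        decide (k1 a < k1 b) || !decide (k1 b < k1 a) && decide (k2 a < k2 b)) x acc) [] xs := rfl
  rw [h1, PySem.List.sorted_eq_foldl_insertBy, hfe]

-- B's single sort produces exactly A's two blocks
theorem pv_main (d : PySem.Dict String Int) (hnd : d.keys.Nodup) :
    PySem.List.sorted2 d.items (fun kv => pvRankTable.getD kv.1 (pvCanon.length : Int))
        (fun kv => kv.1) =
      (pvCC.filter (fun c => d.contains c)).map (fun c => (c, d.getD c 0)) ++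
        (PySem.List.sorted (PySem.Dict.mk (d.items.filter (fun p => !pvCC.contains p.1))).keys
            (fun c => c)).map
          (fun c => (c, ((PySem.Dict.mk (d.items.filter (fun p => !pvCC.contains p.1))).get? c).getD 0)) := by
  set dR : PySem.Dict String Int := PySem.Dict.mk (d.items.filter (fun p => !pvCC.contains p.1)) with hdR
  have hkeysR : dR.keys = d.keys.filter (fun c => !pvCC.contains c) := by
    simp only [hdR, PySem.Dict.keys]
    induction d.items with
    | nil => rfl
    | cons p t ih =>
      simp only [List.contains_eq_mem] at ih ⊢
      by_cases h : p.1 ∈ pvCC <;> simp [h, ih]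
  have hndR : dR.keys.Nodup := by rw [hkeysR]; exact hnd.filter _
  have hnotCC : ∀ c ∈ dR.keys, c ∉ pvCC := by
    intro c hc
    rw [hkeysR] at hc
    have := (List.mem_filter.mp hc).2
    simp at this
    exact this
  have hgetR : ∀ c ∈ dR.keys, dR.get? c = d.get? c := by
    intro c hc
    obtain ⟨p, hpmem, rfl⟩ := List.mem_map.mp hc
    rw [← Prod.mk.eta (p := p)] at hpmem
    have h1 : dR.get? p.1 = some p.2 := PySem.Dict.get?_of_mem_items dR hpmem hndR
    have h2 : d.get? p.1 = some p.2 :=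
      PySem.Dict.get?_of_mem_items d (List.mem_of_mem_filter hpmem) hnd
    rw [h1, h2]
  have hmap2 : (PySem.List.sorted dR.keys (fun c => c)).map (fun c => (c, (dR.get? c).getD 0))
      = (PySem.List.sorted dR.keys (fun c => c)).map (fun c => (c, d.getD c 0)) := by
    apply List.map_congr_left
    intro c hc
    have hcm : c ∈ dR.keys := (PySem.List.mem_sorted _ _ _ _).mp hc
    rw [hgetR c hcm, PySem.Dict.getD_eq_get?_getD]
  rw [hmap2]
  rw [pv_sorted2_eq_sorted_lex]
  apply PySem.List.sorted_eq_of_perm_of_pairwise_lt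
  · -- the right-hand side is a rearrangement of the dict items
    rw [← List.map_append]
    have hkperm : (pvCC.filter (fun c => d.contains c) ++
        PySem.List.sorted dR.keys (fun c => c)).Perm d.keys := by
      have hp1 : (pvCC.filter (fun c => d.contains c)).Perm
          (d.keys.filter (fun c => pvCC.contains c)) := by
        rw [List.perm_ext_iff_of_nodup (pvCC_nodup.filter _) (hnd.filter _)]
        intro a
        simp only [List.mem_filter]
        constructor
        · rintro ⟨h1, h2⟩
          exact ⟨(PySem.Dict.contains_iff_mem_keys _ _).mp h2, by simpa using h1⟩
        · rintro ⟨h1, h2⟩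
          refine ⟨by simpa using h2, (PySem.Dict.contains_iff_mem_keys _ _).mpr h1⟩
      have hp2 : (PySem.List.sorted dR.keys (fun c => c)).Perm
          (d.keys.filter (fun c => !pvCC.contains c)) := by
        rw [← hkeysR]; exact PySem.List.sorted_perm ..
      exact (hp1.append hp2).trans (List.filter_append_perm _ _)
    have := hkperm.map (fun c => (c, d.getD c 0))
    rw [PySem.Dict.items_eq_map_keys d hnd 0]
    exact this
  · -- and it is strictly increasing under the (rank, name) key
    rw [List.pairwise_append]
    refine ⟨?_, ?_, ?_⟩
    · rw [List.pairwise_map]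
      have := pvCC_rank_pairwise.sublist (List.filter_sublist (p := fun c => d.contains c))
      refine this.imp ?_
      intro a b h
      exact Prod.Lex.toLex_lt_toLex.mpr (Or.inl h)
    · rw [List.pairwise_map]
      have hle : (PySem.List.sorted dR.keys (fun c => c)).Pairwise (fun a b : String => a ≤ b) :=
        PySem.List.sorted_pairwise ..
      have hnd2 : (PySem.List.sorted dR.keys (fun c => c)).Nodup :=
        (PySem.List.sorted_perm ..).nodup_iff.mpr hndR
      have hlt := hle.and hnd2
      refine hlt.imp_of_mem ?_
      intro a b ha hb ⟨h1, h2⟩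
      have ha' : a ∉ pvCC := hnotCC a ((PySem.List.mem_sorted _ _ _ _).mp ha)
      have hb' : b ∉ pvCC := hnotCC b ((PySem.List.mem_sorted _ _ _ _).mp hb)
      refine Prod.Lex.toLex_lt_toLex.mpr (Or.inr ⟨?_, lt_of_le_of_ne h1 h2⟩)
      show pvRk a = pvRk b
      rw [pvRk_of_not_mem ha', pvRk_of_not_mem hb']
    · intro x hx y hy
      obtain ⟨a, ha, rfl⟩ := List.mem_map.mp hx
      obtain ⟨b, hb, rfl⟩ := List.mem_map.mp hy
      have ha' : a ∈ pvCC := List.mem_of_mem_filter ha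
      have hb' : b ∉ pvCC := hnotCC b ((PySem.List.mem_sorted _ _ _ _).mp hb)
      refine Prod.Lex.toLex_lt_toLex.mpr (Or.inl ?_)
      have h1 : pvRk a < 13 := pvRk_lt_of_mem ha'
      have h2 : pvRk b = 13 := pvRk_of_not_mem hb'
      show pvRk a < pvRk b
      omega

theorem ports_agree (courts : List String) (counts : List Int) :
    canonical_circuit_sort_py courts counts = canonical_circuit_sort_py_alt courts counts := by
  unfold canonical_circuit_sort_py canonical_circuit_sort_py_alt
  set d0 : PySem.Dict String Int :=
    (courts.zip counts).foldl (fun d p => d.insert p.1 p.2) PySem.Dict.empty with hd0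
  have hnd : d0.keys.Nodup := by
    rw [hd0]
    exact PySem.Dict.nodup_keys_foldl_insert_key _ _ _ _ PySem.Dict.nodup_keys_empty
  dsimp only
  have h1 : List.foldl pvStepA (d0, []) pvCanon =
      (PySem.Dict.mk (d0.items.filter (fun p => !pvCC.contains p.1)),
       [] ++ (pvCC.filter (fun c => d0.contains c)).map (fun c => (c, d0.getD c 0))) := by
    rw [pvCanon_eq]
    exact pv_phase1 pvCC d0 [] hnd pvCC_nodup
  rw [h1]
  dsimp only
  rw [PySem.List.foldl_append_singleton_eq_map]
  rw [pv_main d0 hnd]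
  simp

-- ===== VERDICT (by name: the statement is the Claim_ definition above) =====
theorem canonical_circuit_sort_py_spec : Claim_equal_canonical_circuit_sort_py := by
  intro courts counts _
  unfold Spec_canonical_circuit_sort_py
  exact ports_agree courts counts
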